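-- pv_equiv track=rewrite | github.com/Chazaster/CFG-Compression | huffman.py | buildTableSequitur
-- ===== SOURCE A (Python) =====
-- def buildTableSequitur(S, rules):
--     temp = []
--     for symbol in S:
--         temp.append(symbol)
--
--     rightSideRules = [rule[1] for rule in rules]
--     for rule in rightSideRules:
--         for symbol in rule:
--             temp.append(symbol)
--
--     table = symbolTable(temp)
--     return table
--
-- def symbolTable(temp):
--     cleanedTemp = list(set(temp))
--     lower = []
--     upper = []
--     for i in cleanedTemp:
--         if i.islower():
--             lower.append(i)
--         else:
--             upper.append(i)
--     lower.sort()
--     upper.sort()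
--     symbolTable = lower + upper
--     return symbolTable
-- ===== SOURCE B (Python) =====
-- def buildTableSequitur(S, rules):
--     table = []
--     for symbol in S:
--         _insertSymbol(table, symbol)
--     for rule in rules:
--         for symbol in rule[1]:
--             _insertSymbol(table, symbol)
--     return table
--
-- def _insertSymbol(table, symbol):
--     # keep `table` sorted (lowercase block first, each block ascending) with no
--     # duplicates, by ordered insertion; duplicates are skipped.
--     key = (not symbol.islower(), symbol)
--     i = 0
--     while i < len(table):
--         k = (not table[i].islower(), table[i])
--         if key == k:
--             return
--         if key < k:
--             break
--         i += 1
--     table.insert(i, symbol)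
-- ===== Notes on version B (the rewrite author's own statement) =====
-- stated objective: alternative
-- what changed: Instead of gathering all symbols into a list, deduplicating with set() and running two sorts over a partition, B maintains a single sorted deduplicated table incrementally: each symbol is placed by ordered insertion under the key (not islower, symbol) and duplicates are skipped, so no set and no sort call remain; Pre_ excludes rules with fewer than two elements, on which A raises IndexError (B raises there too).
import Mathlib
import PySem

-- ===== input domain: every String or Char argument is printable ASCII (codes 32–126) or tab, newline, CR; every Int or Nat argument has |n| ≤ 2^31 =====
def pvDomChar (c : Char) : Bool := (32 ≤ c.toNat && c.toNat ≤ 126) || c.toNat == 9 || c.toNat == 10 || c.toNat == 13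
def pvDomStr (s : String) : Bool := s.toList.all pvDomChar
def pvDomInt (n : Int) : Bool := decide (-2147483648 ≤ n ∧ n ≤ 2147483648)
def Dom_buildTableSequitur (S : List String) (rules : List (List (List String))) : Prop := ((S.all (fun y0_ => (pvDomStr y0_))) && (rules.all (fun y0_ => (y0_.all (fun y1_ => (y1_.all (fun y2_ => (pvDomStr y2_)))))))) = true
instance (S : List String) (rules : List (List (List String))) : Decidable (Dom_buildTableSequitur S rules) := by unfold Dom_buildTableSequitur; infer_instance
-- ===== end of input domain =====

-- B replaces A's gather/set()-dedupe/partition/two-sorts pipeline with one pass of ordered,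
-- duplicate-skipping insertion into a table kept sorted by the key (not islower, symbol)
-- (objective: alternative).

-- ===== PORT A =====
-- hand port of Python str.islower (no PySem primitive): exact on ASCII strings —
-- true iff the string contains a lowercase letter and no uppercase letter.
def pyStrIslower (s : String) : Bool :=
  s.toList.any PySem.Chars.islower && s.toList.all (fun c => !PySem.Chars.isupper c)

def symbolTablePy (temp : List String) : List String :=
  let cleanedTemp := PySem.Set.ofList temp
  let p := cleanedTemp.foldl
    (fun (p : List String × List String) i =>
      if pyStrIslower i then (p.1 ++ [i], p.2) else (p.1, p.2 ++ [i])) ([], [])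
  PySem.List.sorted p.1 (fun x => x) false ++ PySem.List.sorted p.2 (fun x => x) false

def buildTableSequitur (S : List String) (rules : List (List (List String))) : List String :=
  let temp := S.foldl (fun acc symbol => acc ++ [symbol]) []
  -- rule[1] raises IndexError when the rule has fewer than two parts; excluded by Pre_ below
  let rightSideRules := rules.map (fun rule => PySem.List.pyGetD rule 1 [])
  let temp := rightSideRules.foldl
    (fun acc rule => rule.foldl (fun a symbol => a ++ [symbol]) acc) temp
  symbolTablePy temp

-- ===== PORT B =====
-- Python tuple comparison (not a.islower(), a) < (not b.islower(), b): False < True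
def keyLt (a b : String) : Bool :=
  ((!pyStrIslower a) < (!pyStrIslower b)) ||
    ((!pyStrIslower a) == (!pyStrIslower b) && decide (a < b))

-- B's while loop over the sorted table: skip on key equality, insert before the
-- first strictly larger key, append at the end.
def insertSymbol (table : List String) (symbol : String) : List String :=
  match table with
  | [] => [symbol]
  | t :: ts =>
    if (!pyStrIslower symbol) == (!pyStrIslower t) && symbol == t then t :: ts
    else if keyLt symbol t then symbol :: t :: ts
    else t :: insertSymbol ts symbol

def buildTableSequitur_alt (S : List String) (rules : List (List (List String))) : List String :=
  let table := S.foldl insertSymbol []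
  rules.foldl (fun tb rule => (PySem.List.pyGetD rule 1 []).foldl insertSymbol tb) table

-- ===== PRECONDITION & SPEC =====
-- Pre_ excludes exactly the inputs on which A raises IndexError at rule[1]
-- (a rule with fewer than two parts); A returns on every other input.
def Pre_buildTableSequitur (S : List String) (rules : List (List (List String))) : Prop :=
  ∀ rule ∈ rules, 2 ≤ rule.length
instance (S : List String) (rules : List (List (List String))) : Decidable (Pre_buildTableSequitur S rules) := by unfold Pre_buildTableSequitur; infer_instance

def pvWitness_buildTableSequitur : List String × List (List (List String)) :=
  (["a", "B"], [[["X"], ["b", "C", "a"]]])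

def Spec_buildTableSequitur (S : List String) (rules : List (List (List String))) (out : List String) : Prop := out = buildTableSequitur_alt S rules
instance (S : List String) (rules : List (List (List String))) (out : List String) : Decidable (Spec_buildTableSequitur S rules out) := by unfold Spec_buildTableSequitur; infer_instance

-- ===== CLAIM (what is proved, stated in full; the proofs are below) =====
def Claim_equal_buildTableSequitur : Prop := ∀ (S : List String) (rules : List (List (List String))), Dom_buildTableSequitur S rules → Pre_buildTableSequitur S rules → Spec_buildTableSequitur S rules (buildTableSequitur S rules)

-- ===== LEMMAS AND PROOFS =====

-- the strict order B's insertion maintains, as a Prop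
def keyR (a b : String) : Prop :=
  toLex (!pyStrIslower a, a) < toLex (!pyStrIslower b, b)

theorem keyLt_iff (a b : String) : keyLt a b = true ↔ keyR a b := by
  unfold keyLt keyR
  rw [Prod.Lex.lt_iff]
  cases h1 : pyStrIslower a <;> cases h2 : pyStrIslower b <;>
    simp [Bool.lt_iff]

theorem keyR_asymm {a b : String} (h1 : keyR a b) (h2 : keyR b a) : False :=
  absurd h2 (lt_asymm h1)

theorem keyR_irrefl (a : String) : ¬ keyR a a := lt_irrefl _

theorem keyR_trans {a b c : String} (h1 : keyR a b) (h2 : keyR b c) : keyR a c :=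
  lt_trans h1 h2

theorem keyR_total {a b : String} (h : a ≠ b) : keyR a b ∨ keyR b a := by
  have hne : toLex ((!pyStrIslower a), a) ≠ toLex ((!pyStrIslower b), b) := by
    intro he
    exact h (congrArg (fun p => (ofLex p).2) he)
  exact lt_or_gt_of_ne hne

theorem mem_insertSymbol (L : List String) (s a : String) :
    a ∈ insertSymbol L s ↔ a = s ∨ a ∈ L := by
  induction L with
  | nil => simp [insertSymbol]
  | cons t ts ih =>
    by_cases he : s = t
    · subst he
      simp [insertSymbol]
    · have hc : ((!pyStrIslower s) == (!pyStrIslower t) && s == t) = false := by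
        simp [he]
      by_cases hk : keyLt s t = true
      · simp only [insertSymbol, hc, hk, Bool.false_eq_true, if_false, if_true]
        simp [List.mem_cons]
      · simp only [insertSymbol, hc, hk, Bool.false_eq_true, if_false]
        simp [List.mem_cons, ih]
        tauto

theorem pairwise_insertSymbol (L : List String) (s : String)
    (h : L.Pairwise keyR) : (insertSymbol L s).Pairwise keyR := by
  induction L with
  | nil => simp [insertSymbol]
  | cons t ts ih =>
    rw [List.pairwise_cons] at h
    by_cases he : s = t
    · subst he
      simpa [insertSymbol] using List.pairwise_cons.mpr h
    · have hc : ((!pyStrIslower s) == (!pyStrIslower t) && s == t) = false := by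
        simp [he]
      by_cases hk : keyLt s t = true
      · have hst : keyR s t := (keyLt_iff s t).mp hk
        simp only [insertSymbol, hc, hk]
        simp only [Bool.false_eq_true, if_false, if_true]
        refine List.pairwise_cons.mpr ⟨?_, List.pairwise_cons.mpr h⟩
        intro x hx
        rcases List.mem_cons.mp hx with rfl | hx'
        · exact hst
        · exact keyR_trans hst (h.1 x hx')
      · have hts : keyR t s := by
          rcases keyR_total he with h1 | h1
          · exact absurd ((keyLt_iff s t).mpr h1) hk
          · exact h1
        simp only [insertSymbol, hc, hk]
        simp only [Bool.false_eq_true, if_false]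
        refine List.pairwise_cons.mpr ⟨?_, ih h.2⟩
        intro x hx
        rcases (mem_insertSymbol ts s x).mp hx with rfl | hx'
        · exact hts
        · exact h.1 x hx'

theorem foldl_insertSymbol (xs : List String) :
    ∀ L : List String, L.Pairwise keyR →
      (xs.foldl insertSymbol L).Pairwise keyR ∧
      (∀ a, a ∈ xs.foldl insertSymbol L ↔ a ∈ xs ∨ a ∈ L) := by
  induction xs with
  | nil => intro L h; simpa using h
  | cons x xs ih =>
    intro L h
    have h' := pairwise_insertSymbol L x h
    rcases ih (insertSymbol L x) h' with ⟨hp, hm⟩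
    refine ⟨hp, ?_⟩
    intro a
    rw [List.foldl_cons, hm a, mem_insertSymbol]
    simp [List.mem_cons]
    tauto

-- two lists sorted strictly by keyR with the same members are equal
theorem pairwise_unique :
    ∀ (l₁ l₂ : List String), (∀ a, a ∈ l₁ ↔ a ∈ l₂) →
      l₁.Pairwise keyR → l₂.Pairwise keyR → l₁ = l₂ := by
  intro l₁
  induction l₁ with
  | nil =>
    intro l₂ hm _ _
    cases l₂ with
    | nil => rfl
    | cons b t₂ => exact absurd ((hm b).mpr (List.mem_cons_self)) (by simp)
  | cons a t₁ ih =>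
    intro l₂ hm h1 h2
    cases l₂ with
    | nil => exact absurd ((hm a).mp (List.mem_cons_self)) (by simp)
    | cons b t₂ =>
      rw [List.pairwise_cons] at h1 h2
      have hab : a = b := by
        by_contra hne
        have ha2 : a ∈ b :: t₂ := (hm a).mp List.mem_cons_self
        have hb1 : b ∈ a :: t₁ := (hm b).mpr List.mem_cons_self
        have ha2' : a ∈ t₂ := by
          rcases List.mem_cons.mp ha2 with h | h
          · exact absurd h hne
          · exact h
        have hb1' : b ∈ t₁ := by
          rcases List.mem_cons.mp hb1 with h | h
          · exact absurd h.symm hne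
          · exact h
        exact keyR_asymm (h1.1 b hb1') (h2.1 a ha2')
      subst hab
      have hm' : ∀ x, x ∈ t₁ ↔ x ∈ t₂ := by
        intro x
        constructor
        · intro hx
          have hxa : x ≠ a := fun he => keyR_irrefl a (he ▸ h1.1 x hx)
          rcases List.mem_cons.mp ((hm x).mp (List.mem_cons_of_mem a hx)) with h | h
          · exact absurd h hxa
          · exact h
        · intro hx
          have hxa : x ≠ a := fun he => keyR_irrefl a (he ▸ h2.1 x hx)
          rcases List.mem_cons.mp ((hm x).mpr (List.mem_cons_of_mem a hx)) with h | h
          · exact absurd h hxa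
          · exact h
      rw [ih t₂ hm' h1.2 h2.2]

-- A's partition loop appends each element to the matching bucket: it computes the two filters.
theorem partition_loop (cs l u : List String) :
    cs.foldl (fun (p : List String × List String) i =>
        if pyStrIslower i then (p.1 ++ [i], p.2) else (p.1, p.2 ++ [i])) (l, u)
      = (l ++ cs.filter (fun i => pyStrIslower i),
         u ++ cs.filter (fun i => !pyStrIslower i)) := by
  induction cs generalizing l u with
  | nil => simp
  | cons c cs ih =>
    by_cases h : pyStrIslower c = true <;>
      simp [h, ih]

-- a sorted list of distinct strings is strictly increasing
theorem sorted_id_pairwise_lt (xs : List String) (h : xs.Nodup) :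
    (PySem.List.sorted xs (fun x => x) false).Pairwise (· < ·) := by
  have hle := PySem.List.sorted_pairwise xs (fun x => x)
  have hnd : (PySem.List.sorted xs (fun x => x) false).Nodup :=
    (PySem.List.sorted_perm xs (fun x => x) false).nodup_iff.mpr h
  have := (hle.and hnd)
  exact this.imp (fun hab => lt_of_le_of_ne hab.1 hab.2)

-- A's output is strictly sorted by keyR and holds exactly the distinct symbols of temp
theorem symbolTablePy_char (temp : List String) :
    (symbolTablePy temp).Pairwise keyR ∧
    (∀ a, a ∈ symbolTablePy temp ↔ a ∈ temp) := by
  unfold symbolTablePy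
  dsimp only
  set cs := PySem.Set.ofList temp with hcs
  have hnodup : cs.Nodup := PySem.Set.nodup_ofList temp
  rw [partition_loop]
  simp only [List.nil_append]
  set p : String → Bool := fun i => pyStrIslower i with hp
  set lo := PySem.List.sorted (cs.filter p) (fun x => x) false with hlo
  set hi := PySem.List.sorted (cs.filter (fun i => !p i)) (fun x => x) false with hhi
  have hmemlo : ∀ a ∈ lo, p a = true := by
    intro a ha
    rw [hlo, PySem.List.mem_sorted, List.mem_filter] at ha
    exact ha.2
  have hmemhi : ∀ a ∈ hi, p a = false := by
    intro a ha
    rw [hhi, PySem.List.mem_sorted, List.mem_filter] at ha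
    simpa using ha.2
  simp only [hp] at hmemlo hmemhi
  constructor
  · rw [List.pairwise_append]
    refine ⟨?_, ?_, ?_⟩
    · have := (sorted_id_pairwise_lt (cs.filter p) (hnodup.filter p)).imp_of_mem
        (l := lo) (S := keyR) ?_
      · exact this
      · intro a b ha hb hab
        unfold keyR
        rw [Prod.Lex.lt_iff]
        exact Or.inr ⟨by simp [hmemlo a ha, hmemlo b hb], hab⟩
    · have := (sorted_id_pairwise_lt (cs.filter (fun i => !p i))
          (hnodup.filter _)).imp_of_mem
        (l := hi) (S := keyR) ?_
      · exact this
      · intro a b ha hb hab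
        unfold keyR
        rw [Prod.Lex.lt_iff]
        exact Or.inr ⟨by simp [hmemhi a ha, hmemhi b hb], hab⟩
    · intro a ha b hb
      unfold keyR
      rw [Prod.Lex.lt_iff]
      refine Or.inl ?_
      have h1 := hmemlo a ha
      have h2 := hmemhi b hb
      simp only [ofLex_toLex, h1, h2]
      exact Bool.lt_iff.mpr ⟨rfl, rfl⟩
  · intro a
    rw [List.mem_append, hlo, hhi, PySem.List.mem_sorted, PySem.List.mem_sorted,
      List.mem_filter, List.mem_filter]
    constructor
    · rintro (⟨h, _⟩ | ⟨h, _⟩) <;> exact (PySem.Set.mem_ofList temp a).mp (hcs ▸ h)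
    · intro h
      have h' : a ∈ cs := hcs ▸ (PySem.Set.mem_ofList temp a).mpr h
      by_cases hpa : p a = true
      · exact Or.inl ⟨h', hpa⟩
      · exact Or.inr ⟨h', by simp [hpa]⟩

-- B's nested insertion loops are the insertion fold over the concatenated symbol list
theorem foldl_rules (rules : List (List (List String))) (tb : List String) :
    rules.foldl (fun tb rule => (PySem.List.pyGetD rule 1 []).foldl insertSymbol tb) tb
      = (rules.flatMap (fun rule => PySem.List.pyGetD rule 1 [])).foldl insertSymbol tb := by
  induction rules generalizing tb with
  | nil => simp
  | cons r rs ih =>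
    rw [List.foldl_cons, List.flatMap_cons, List.foldl_append, ih]

theorem alt_eq_fold (S : List String) (rules : List (List (List String))) :
    buildTableSequitur_alt S rules
      = (S ++ rules.flatMap (fun rule => PySem.List.pyGetD rule 1 [])).foldl
          insertSymbol [] := by
  unfold buildTableSequitur_alt
  rw [List.foldl_append, foldl_rules]

theorem buildTableSequitur_spec' (S : List String) (rules : List (List (List String))) :
    buildTableSequitur S rules = buildTableSequitur_alt S rules := by
  have htemp :
      (rules.map (fun rule => PySem.List.pyGetD rule 1 [])).foldl
          (fun acc rule => rule.foldl (fun a s => a ++ [s]) acc)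
          (S.foldl (fun acc s => acc ++ [s]) [])
        = S ++ rules.flatMap (fun rule => PySem.List.pyGetD rule 1 []) := by
    simp only [PySem.List.foldl_append_singleton]
    rw [PySem.List.foldl_append_eq_flatMap]
    simp [List.flatMap_def, Function.comp_def]
  unfold buildTableSequitur
  dsimp only
  rw [htemp, alt_eq_fold]
  set temp := S ++ rules.flatMap (fun rule => PySem.List.pyGetD rule 1 []) with ht
  rcases symbolTablePy_char temp with ⟨hAp, hAm⟩
  rcases foldl_insertSymbol temp [] (by simp) with ⟨hBp, hBm⟩
  refine pairwise_unique _ _ ?_ hAp hBp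
  intro a
  rw [hAm a, hBm a]
  simp

-- ===== VERDICT (by name: the statement is the Claim_ definition above) =====
theorem buildTableSequitur_spec : Claim_equal_buildTableSequitur := by
  intro S rules _ _
  exact buildTableSequitur_spec' S rules
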